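-- pv_equiv track=rewrite | github.com/emmtrix/emx-onnx2c | tests/test_ops.py | _arg_reduce_output_shape
-- ===== SOURCE A (Python) =====
-- def _arg_reduce_output_shape(
--     input_shape: list[int], axis: int, keepdims: int
-- ) -> list[int]:
--     rank = len(input_shape)
--     if axis < 0:
--         axis += rank
--     if keepdims:
--         return [
--             1 if dim_axis == axis else dim
--             for dim_axis, dim in enumerate(input_shape)
--         ]
--     return [dim for dim_axis, dim in enumerate(input_shape) if dim_axis != axis]
-- ===== SOURCE B (Python) =====
-- def _arg_reduce_output_shape(
--     input_shape: list[int], axis: int, keepdims: int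
-- ) -> list[int]:
--     rank = len(input_shape)
--     if axis < 0:
--         axis += rank
--     if 0 <= axis < rank:
--         mid = [1] if keepdims else []
--         return input_shape[:axis] + mid + input_shape[axis + 1:]
--     return list(input_shape)
-- ===== Notes on version B (the rewrite author's own statement) =====
-- stated objective: simpler
-- what changed: Replaces the per-element enumerate scan (comparing every index against axis) with positional slice splicing: B normalizes the axis, and when it is in range returns shape[:axis] + ([1] if keepdims else []) + shape[axis+1:], otherwise a plain copy.
import Mathlib
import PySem

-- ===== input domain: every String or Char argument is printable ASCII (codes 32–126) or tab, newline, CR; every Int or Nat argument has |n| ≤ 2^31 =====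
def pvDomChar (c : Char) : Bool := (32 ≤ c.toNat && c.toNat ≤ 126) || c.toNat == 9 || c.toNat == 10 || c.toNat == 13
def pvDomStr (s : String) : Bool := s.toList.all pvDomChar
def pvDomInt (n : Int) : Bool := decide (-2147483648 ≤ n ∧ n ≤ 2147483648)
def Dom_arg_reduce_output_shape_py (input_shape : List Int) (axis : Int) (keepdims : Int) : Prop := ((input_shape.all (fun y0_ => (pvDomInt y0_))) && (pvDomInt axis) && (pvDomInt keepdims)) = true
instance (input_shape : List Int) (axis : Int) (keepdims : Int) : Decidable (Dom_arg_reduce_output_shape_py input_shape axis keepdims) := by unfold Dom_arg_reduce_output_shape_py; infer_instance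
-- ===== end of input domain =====

-- ===== PORT A =====
-- B replaces the per-index enumerate scan by slice splicing around the normalized axis (objective: simpler).
def arg_reduce_output_shape_py (input_shape : List Int) (axis : Int) (keepdims : Int) : List Int :=
  let rank : Int := input_shape.length
  let axis := if axis < 0 then axis + rank else axis
  if keepdims ≠ 0 then
    (PySem.List.enumerate input_shape).map (fun p => if p.1 = axis then (1 : Int) else p.2)
  else
    ((PySem.List.enumerate input_shape).filter (fun p => p.1 != axis)).map (·.2)

-- ===== PORT B =====
def arg_reduce_output_shape_py_alt (input_shape : List Int) (axis : Int) (keepdims : Int) : List Int :=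
  let rank : Int := input_shape.length
  let axis := if axis < 0 then axis + rank else axis
  if 0 ≤ axis ∧ axis < rank then
    let mid : List Int := if keepdims ≠ 0 then [1] else []
    PySem.List.slice input_shape none (some axis) ++ mid ++
      PySem.List.slice input_shape (some (axis + 1)) none
  else
    input_shape

-- ===== PRECONDITION & SPEC =====
def Spec_arg_reduce_output_shape_py (input_shape : List Int) (axis : Int) (keepdims : Int) (out : List Int) : Prop := out = arg_reduce_output_shape_py_alt input_shape axis keepdims
instance (input_shape : List Int) (axis : Int) (keepdims : Int) (out : List Int) : Decidable (Spec_arg_reduce_output_shape_py input_shape axis keepdims out) := by unfold Spec_arg_reduce_output_shape_py; infer_instance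

-- ===== CLAIM (what is proved, stated in full; the proofs are below) =====
def Claim_equal_arg_reduce_output_shape_py : Prop := ∀ (input_shape : List Int) (axis : Int) (keepdims : Int), Dom_arg_reduce_output_shape_py input_shape axis keepdims → Spec_arg_reduce_output_shape_py input_shape axis keepdims (arg_reduce_output_shape_py input_shape axis keepdims)

-- ===== LEMMAS AND PROOFS =====

-- ===== VERDICT (by name: the statement is the Claim_ definition above) =====
-- out-of-range axis: the keepdims map is the identity
theorem keep_out (xs : List Int) (s a : Int) (h : a < s ∨ s + xs.length ≤ a) :
    (PySem.List.enumerate xs s).map (fun p => if p.1 = a then (1 : Int) else p.2) = xs := by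
  induction xs generalizing s with
  | nil => simp [PySem.List.enumerate_nil]
  | cons x xs ih =>
    simp only [PySem.List.enumerate_cons, List.map_cons, List.length_cons] at h ⊢
    rw [if_neg (by push_cast at h ⊢; omega), ih (s + 1) (by push_cast at h ⊢; omega)]

-- out-of-range axis: the filter keeps everything
theorem drop_out (xs : List Int) (s a : Int) (h : a < s ∨ s + xs.length ≤ a) :
    ((PySem.List.enumerate xs s).filter (fun p => p.1 != a)).map (·.2) = xs := by
  induction xs generalizing s with
  | nil => simp [PySem.List.enumerate_nil]
  | cons x xs ih =>
    simp only [PySem.List.enumerate_cons, List.length_cons] at h ⊢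
    rw [List.filter_cons, if_pos (by simp; push_cast at h ⊢; omega)]
    simp only [List.map_cons]
    rw [ih (s + 1) (by push_cast at h ⊢; omega)]

-- in-range axis s + n: the map replaces exactly position n by 1
theorem keep_in (xs : List Int) (s : Int) (n : Nat) (h : n < xs.length) :
    (PySem.List.enumerate xs s).map (fun p => if p.1 = (s + n : Int) then (1 : Int) else p.2)
      = xs.take n ++ 1 :: xs.drop (n + 1) := by
  induction xs generalizing s n with
  | nil => simp at h
  | cons x xs ih =>
    cases n with
    | zero =>
      simp only [PySem.List.enumerate_cons, List.map_cons, Nat.cast_zero, add_zero,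
        List.take_zero, List.drop_succ_cons, List.drop_zero, List.nil_append]
      congr 1
      exact keep_out xs (s + 1) s (Or.inl (by omega))
    | succ n =>
      simp only [PySem.List.enumerate_cons, List.map_cons, List.take_succ_cons,
        List.drop_succ_cons, List.cons_append]
      rw [if_neg (by push_cast; omega)]
      congr 1
      rw [show (s + ((n + 1 : Nat) : Int)) = (s + 1) + (n : Int) by push_cast; ring]
      exact ih (s + 1) n (by simpa using h)

-- in-range axis s + n: the filter drops exactly position n
theorem drop_in (xs : List Int) (s : Int) (n : Nat) (h : n < xs.length) :
    ((PySem.List.enumerate xs s).filter (fun p => p.1 != (s + n : Int))).map (·.2)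
      = xs.take n ++ xs.drop (n + 1) := by
  induction xs generalizing s n with
  | nil => simp at h
  | cons x xs ih =>
    cases n with
    | zero =>
      rw [PySem.List.enumerate_cons, List.filter_cons, if_neg (by simp)]
      simpa using drop_out xs (s + 1) s (Or.inl (by omega))
    | succ n =>
      rw [PySem.List.enumerate_cons, List.filter_cons, if_pos (by simp; omega)]
      simp only [List.map_cons, List.take_succ_cons, List.drop_succ_cons, List.cons_append]
      congr 1
      rw [show (s + ((n + 1 : Nat) : Int)) = (s + 1) + (n : Int) by push_cast; ring]
      exact ih (s + 1) n (by simpa using h)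

-- the two bodies agree for any (already normalized) axis value
theorem core (xs : List Int) (a k : Int) :
    (if k ≠ 0 then
        (PySem.List.enumerate xs).map (fun p => if p.1 = a then (1 : Int) else p.2)
      else ((PySem.List.enumerate xs).filter (fun p => p.1 != a)).map (·.2))
    = (if 0 ≤ a ∧ a < (xs.length : Int) then
        PySem.List.slice xs none (some a) ++ (if k ≠ 0 then [(1 : Int)] else []) ++
          PySem.List.slice xs (some (a + 1)) none
      else xs) := by
  by_cases hin : 0 ≤ a ∧ a < (xs.length : Int)
  · rw [if_pos hin]
    obtain ⟨h0, hlt⟩ := hin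
    obtain ⟨n, hn'⟩ : ∃ n : Nat, a = (n : Int) := ⟨a.toNat, (Int.toNat_of_nonneg h0).symm⟩
    subst hn'
    have hn : n < xs.length := by exact_mod_cast hlt
    rw [PySem.List.slice_to_natCast, show ((n : Int) + 1) = ((n + 1 : Nat) : Int) by push_cast; ring,
      PySem.List.slice_from_natCast]
    by_cases hk : k ≠ 0
    · rw [if_pos hk, if_pos hk]
      simpa using keep_in xs 0 n hn
    · rw [if_neg hk, if_neg hk]
      simpa using drop_in xs 0 n hn
  · rw [if_neg hin]
    have hout : a < 0 ∨ (0 : Int) + xs.length ≤ a := by omega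
    by_cases hk : k ≠ 0
    · rw [if_pos hk]
      exact keep_out xs 0 a (by simpa using hout)
    · rw [if_neg hk]
      exact drop_out xs 0 a (by simpa using hout)

-- ===== VERDICT (by name: the statement is the Claim_ definition above) =====
theorem arg_reduce_output_shape_py_spec : Claim_equal_arg_reduce_output_shape_py := by
  intro input_shape axis keepdims _
  exact core input_shape (if axis < 0 then axis + (input_shape.length : Int) else axis) keepdims
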